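-- pv_equiv track=rewrite | github.com/SmartAudioTools/SmartFramework | tools/devices.py | list2cmdline
-- ===== SOURCE A (Python) =====
-- def list2cmdline(seq):
--     """Adaptation of supbprocess.list2cmdline in order to add quotes if & is in a argument."""
--     result = []
--     needquote = False
--     for arg in seq:
--         bs_buf = []
--         # Add a space to separate this argument from the others
--         if result:
--             result.append(" ")
--         needquote = (
--             (" " in arg) or ("\t" in arg) or ("&" in arg and arg != "&") or not arg
--         )
--         if needquote:
--             result.append('"')
--         for c in arg:
--             if c == "\\":
--                 # Don't know if we need to double yet.
--                 bs_buf.append(c)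
--             elif c == '"':
--                 # Double backslashes.
--                 result.append("\\" * len(bs_buf) * 2)
--                 bs_buf = []
--                 result.append('\\"')
--             else:
--                 # Normal char
--                 if bs_buf:
--                     result.extend(bs_buf)
--                     bs_buf = []
--                 result.append(c)
--         # Add remaining backslashes, if any.
--         if bs_buf:
--             result.extend(bs_buf)
--         if needquote:
--             result.extend(bs_buf)
--             result.append('"')
--     return "".join(result)
-- ===== SOURCE B (Python) =====
-- def list2cmdline(seq):
--     """Right-to-left single pass: a 'quote follows' flag replaces A's pending-backslash buffer."""
--     pieces = []
--     for arg in seq: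
--         needquote = (
--             (" " in arg) or ("\t" in arg) or ("&" in arg and arg != "&") or not arg
--         )
--         rev = []
--         flag = needquote  # a closing quote (or doubling of the trailing run) follows iff we quote
--         for c in reversed(arg):
--             if c == '"':
--                 rev.append('\\"')
--                 flag = True
--             elif c == "\\":
--                 rev.append("\\\\" if flag else "\\")
--             else:
--                 rev.append(c)
--                 flag = False
--         body = "".join(reversed(rev))
--         pieces.append('"' + body + '"' if needquote else body)
--     return " ".join(pieces)
-- ===== Notes on version B (the rewrite author's own statement) =====
-- stated objective: alternative
-- what changed: Replaces A's left-to-right scan with a pending-backslash buffer (flushed singly or doubled when a quote or the end is reached) by a single right-to-left scan per argument carrying a 'quote follows' flag, so each backslash is emitted (singly or doubled) immediately.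
import Mathlib
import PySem

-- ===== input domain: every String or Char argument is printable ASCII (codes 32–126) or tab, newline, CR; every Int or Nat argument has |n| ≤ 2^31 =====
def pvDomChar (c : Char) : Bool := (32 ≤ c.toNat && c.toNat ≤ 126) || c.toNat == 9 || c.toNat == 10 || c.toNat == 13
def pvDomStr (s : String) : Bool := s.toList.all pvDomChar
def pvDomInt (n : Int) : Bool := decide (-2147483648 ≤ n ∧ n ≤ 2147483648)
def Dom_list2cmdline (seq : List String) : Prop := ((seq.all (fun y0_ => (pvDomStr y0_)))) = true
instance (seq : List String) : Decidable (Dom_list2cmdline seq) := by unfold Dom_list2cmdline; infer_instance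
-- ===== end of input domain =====

-- B replaces A's left-to-right scan with a pending-backslash buffer by a single right-to-left
-- scan carrying a "quote follows" flag; same return value (return-value equivalence, no mutation).

-- ===== PORT A =====
-- A's inner character loop: 'result' is kept as a list of character-list pieces
-- ("".join(result) at the end is their flatten); 'bs_buf' is the pending backslash buffer.
def list2cmdlineArgLoop : List Char → List (List Char) → List Char → List (List Char) × List Char
  | [], res, buf => (res, buf)
  | c :: cs, res, buf =>
    if c = '\\' then
      -- Don't know if we need to double yet.
      list2cmdlineArgLoop cs res (buf ++ [c])
    else if c = '"' then
      -- Double backslashes.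
      list2cmdlineArgLoop cs (res ++ [List.replicate (buf.length * 2) '\\'] ++ [['\\', '"']]) []
    else
      -- Normal char (result.extend(bs_buf) adds each buffered backslash as its own piece).
      list2cmdlineArgLoop cs ((if buf = [] then res else res ++ buf.map (fun b => [b])) ++ [[c]]) []

def list2cmdlineLoop : List String → List (List Char) → List (List Char)
  | [], res => res
  | arg :: rest, res =>
    let res1 := if res = [] then res else res ++ [[' ']]
    let needquote := PySem.Str.isIn " " arg || PySem.Str.isIn "\t" arg ||
      (PySem.Str.isIn "&" arg && !(arg == "&")) || arg == ""
    let res2 := if needquote then res1 ++ [['"']] else res1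
    let p := list2cmdlineArgLoop arg.toList res2 []
    -- Add remaining backslashes, if any.
    let res3 := if p.2 = [] then p.1 else p.1 ++ p.2.map (fun b => [b])
    let res4 := if needquote then res3 ++ p.2.map (fun b => [b]) ++ [['"']] else res3
    list2cmdlineLoop rest res4

def list2cmdline (seq : List String) : String :=
  String.mk (list2cmdlineLoop seq []).flatten  -- "".join(result)

-- ===== PORT B =====
-- One step of B's right-to-left scan: state = (collected pieces, "a quote follows" flag).
def list2cmdlineAltStep (st : List (List Char) × Bool) (c : Char) : List (List Char) × Bool :=
  if c = '"' then (st.1 ++ [['\\', '"']], true)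
  else if c = '\\' then (st.1 ++ [if st.2 then ['\\', '\\'] else ['\\']], st.2)
  else (st.1 ++ [[c]], false)

def list2cmdlineAltPiece (arg : String) : List Char :=
  let needquote := PySem.Str.isIn " " arg || PySem.Str.isIn "\t" arg ||
    (PySem.Str.isIn "&" arg && !(arg == "&")) || arg == ""
  let st := arg.toList.reverse.foldl list2cmdlineAltStep ([], needquote)  -- for c in reversed(arg)
  let body := st.1.reverse.flatten  -- "".join(reversed(rev))
  if needquote then '"' :: body ++ ['"'] else body

def list2cmdline_alt (seq : List String) : String :=
  String.mk (PySem.Chars.join [' '] (seq.map list2cmdlineAltPiece))  -- " ".join(pieces)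

-- ===== PRECONDITION & SPEC =====
def Spec_list2cmdline (seq : List String) (out : String) : Prop := out = list2cmdline_alt seq
instance (seq : List String) (out : String) : Decidable (Spec_list2cmdline seq out) := by unfold Spec_list2cmdline; infer_instance

-- ===== CLAIM (what is proved, stated in full; the proofs are below) =====
def Claim_equal_list2cmdline : Prop := ∀ (seq : List String), Dom_list2cmdline seq → Spec_list2cmdline seq (list2cmdline seq)

-- ===== LEMMAS AND PROOFS =====

-- does the next non-backslash character (scanning right) exist and equal '"' (q = flag at the end)?
def pvFlagAfter : List Char → Bool → Bool
  | [], q => q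
  | c :: cs, q => if c = '\\' then pvFlagAfter cs q else decide (c = '"')

-- the escaped body both programs produce for one argument (q = needquote)
def pvEsc : List Char → Bool → List Char
  | [], _ => []
  | c :: cs, q =>
    if c = '\\' then (if pvFlagAfter cs q then ['\\', '\\'] else ['\\']) ++ pvEsc cs q
    else if c = '"' then '\\' :: '"' :: pvEsc cs q
    else c :: pvEsc cs q

-- length of A's pending buffer at the end, starting from k buffered backslashes
def pvTail : List Char → Nat → Nat
  | [], k => k
  | c :: cs, k => if c = '\\' then pvTail cs (k + 1) else pvTail cs 0

-- characters A has flushed into 'result' during the inner loop, starting from k buffered backslashes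
def pvFlushed : List Char → Nat → List Char
  | [], _ => []
  | c :: cs, k =>
    if c = '\\' then pvFlushed cs (k + 1)
    else if c = '"' then List.replicate (2 * k) '\\' ++ ['\\', '"'] ++ pvFlushed cs 0
    else List.replicate k '\\' ++ [c] ++ pvFlushed cs 0

lemma flatten_map_singleton (l : List Char) : (l.map (fun b => [b])).flatten = l := by
  induction l with
  | nil => rfl
  | cons c cs ih => simp [ih]

lemma argLoop_buf (cs : List Char) : ∀ (res : List (List Char)) (k : Nat),
    (list2cmdlineArgLoop cs res (List.replicate k '\\')).2 = List.replicate (pvTail cs k) '\\' := by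
  induction cs with
  | nil => intro res k; simp [list2cmdlineArgLoop, pvTail]
  | cons c cs ih =>
    intro res k
    by_cases hb : c = '\\'
    · rw [list2cmdlineArgLoop, if_pos hb, hb, ← List.replicate_succ']
      rw [ih, pvTail, if_pos rfl]
    · by_cases hq : c = '"'
      · rw [list2cmdlineArgLoop, if_neg hb, if_pos hq]
        have := ih (res ++ [List.replicate ((List.replicate k '\\').length * 2) '\\'] ++ [['\\', '"']]) 0
        simpa [pvTail, hb] using this
      · rw [list2cmdlineArgLoop, if_neg hb, if_neg hq]
        have := ih ((if List.replicate k '\\' = [] then res else res ++ (List.replicate k '\\').map (fun b => [b])) ++ [[c]]) 0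
        simpa [pvTail, hb] using this

lemma argLoop_flatten (cs : List Char) : ∀ (res : List (List Char)) (k : Nat),
    ((list2cmdlineArgLoop cs res (List.replicate k '\\')).1).flatten = res.flatten ++ pvFlushed cs k := by
  induction cs with
  | nil => intro res k; simp [list2cmdlineArgLoop, pvFlushed]
  | cons c cs ih =>
    intro res k
    by_cases hb : c = '\\'
    · rw [list2cmdlineArgLoop, if_pos hb, hb, ← List.replicate_succ', ih, pvFlushed, if_pos rfl]
    · by_cases hq : c = '"'
      · rw [list2cmdlineArgLoop, if_neg hb, if_pos hq]
        have := ih (res ++ [List.replicate ((List.replicate k '\\').length * 2) '\\'] ++ [['\\', '"']]) 0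
        simp only [List.replicate_zero] at this
        rw [this]
        simp [pvFlushed, hb, hq, Nat.mul_comm]
      · rw [list2cmdlineArgLoop, if_neg hb, if_neg hq]
        have := ih ((if List.replicate k '\\' = [] then res else res ++ (List.replicate k '\\').map (fun b => [b])) ++ [[c]]) 0
        simp only [List.replicate_zero] at this
        rw [this]
        by_cases hk : (List.replicate k '\\' : List Char) = []
        · have hk0 : k = 0 := by simpa using hk
          simp [hk, hk0, pvFlushed, hb, hq]
        · simp [hk, pvFlushed, hb, hq, flatten_map_singleton]

-- the bridge: flushed content + tail buffer (+ the extra tail copy when quoting) = pvEsc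
lemma flushed_tail_esc (cs : List Char) : ∀ (k : Nat) (q : Bool),
    pvFlushed cs k ++ List.replicate (pvTail cs k) '\\' ++
      (if q then List.replicate (pvTail cs k) '\\' else []) =
    List.replicate (if pvFlagAfter cs q then 2 * k else k) '\\' ++ pvEsc cs q := by
  induction cs with
  | nil =>
    intro k q
    cases q
    · simp [pvFlushed, pvTail, pvFlagAfter, pvEsc]
    · simp only [pvFlushed, pvTail, pvFlagAfter, pvEsc]
      simp [List.replicate_append_replicate, Nat.two_mul]
  | cons c cs ih =>
    intro k q
    by_cases hb : c = '\\'
    · subst hb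
      simp only [pvFlushed, pvTail, pvFlagAfter, pvEsc, reduceIte, reduceCtorEq]
      rw [ih]
      by_cases hf : pvFlagAfter cs q = true
      · have h2 : 2 * (k + 1) = 2 * k + 2 := by ring
        have h3 : List.replicate (2 * k + 2) '\\' = List.replicate (2 * k) '\\' ++ ['\\', '\\'] := by
          rw [List.replicate_add]; rfl
        simp only [hf, h2]
        simp [h3]
      · simp only [hf]
        simp [List.replicate_succ', hf]
    · have h1 := ih 0 q
      simp only [List.replicate_zero, Nat.mul_zero, List.nil_append] at h1
      by_cases hq : c = '"'
      · subst hq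
        simp only [pvFlushed, pvTail, pvFlagAfter, pvEsc, hb, reduceIte, reduceCtorEq]
        simp [h1]
      · simp only [pvFlushed, pvTail, pvFlagAfter, pvEsc, hb, hq, if_neg, reduceIte]
        simp [hb, hq, h1]

-- B's right-to-left scan computes (pvEsc, pvFlagAfter)
lemma altScan (cs : List Char) (q : Bool) :
    (cs.reverse.foldl list2cmdlineAltStep ([], q)).2 = pvFlagAfter cs q ∧
    ((cs.reverse.foldl list2cmdlineAltStep ([], q)).1).reverse.flatten = pvEsc cs q := by
  rw [List.foldl_reverse]
  induction cs with
  | nil => simp [pvFlagAfter, pvEsc]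
  | cons c cs ih =>
    rw [List.foldr_cons]
    by_cases hq : c = '"'
    · rw [list2cmdlineAltStep, if_pos hq]
      constructor
      · simp [pvFlagAfter, hq]
      · simp [pvEsc, hq, ih.2]
    · by_cases hb : c = '\\'
      · rw [list2cmdlineAltStep, if_neg hq, if_pos hb]
        constructor
        · simp [pvFlagAfter, hb, ih.1]
        · rw [pvEsc, if_pos hb]
          simp only [List.reverse_append, List.reverse_cons, List.reverse_nil]
          cases hf : pvFlagAfter cs q <;> simp [ih.1, hf, ih.2]
      · rw [list2cmdlineAltStep, if_neg hq, if_neg hb]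
        constructor
        · simp [pvFlagAfter, hb, hq]
        · simp [pvEsc, hb, hq, ih.2]

-- shared needquote expression
def pvNq (arg : String) : Bool :=
  PySem.Str.isIn " " arg || PySem.Str.isIn "\t" arg ||
    (PySem.Str.isIn "&" arg && !(arg == "&")) || arg == ""

lemma pieceAlt_eq (arg : String) :
    list2cmdlineAltPiece arg =
      if pvNq arg then '"' :: pvEsc arg.toList (pvNq arg) ++ ['"']
      else pvEsc arg.toList (pvNq arg) := by
  simp only [list2cmdlineAltPiece, pvNq]
  rw [(altScan arg.toList _).2]

lemma esc_ne_nil (c : Char) (cs : List Char) (q : Bool) : pvEsc (c :: cs) q ≠ [] := by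
  rw [pvEsc]
  by_cases hb : c = '\\'
  · cases hf : pvFlagAfter cs q <;> simp [hb, hf]
  · by_cases hq : c = '"' <;> simp [hb, hq]

lemma pieceAlt_ne_nil (arg : String) : list2cmdlineAltPiece arg ≠ [] := by
  rw [pieceAlt_eq]
  by_cases hnq : pvNq arg = true
  · simp [hnq]
  · have harg : arg ≠ "" := by
      intro h; apply hnq; unfold pvNq; subst h; simp
    have : arg.toList ≠ [] := fun h => harg (String.toList_eq_nil_iff.mp h)
    rw [if_neg hnq]
    cases hl : arg.toList with
    | nil => exact absurd hl this
    | cons c cs => exact esc_ne_nil c cs _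

-- one pass of the outer loop body appends exactly B's piece to the flushed content
lemma argPhase (cs : List Char) (res2 : List (List Char)) (q : Bool) :
    (if q then
        (if (list2cmdlineArgLoop cs res2 []).2 = [] then (list2cmdlineArgLoop cs res2 []).1
         else (list2cmdlineArgLoop cs res2 []).1 ++ ((list2cmdlineArgLoop cs res2 []).2).map (fun b => [b])) ++
        ((list2cmdlineArgLoop cs res2 []).2).map (fun b => [b]) ++ [['"']]
      else
        (if (list2cmdlineArgLoop cs res2 []).2 = [] then (list2cmdlineArgLoop cs res2 []).1
         else (list2cmdlineArgLoop cs res2 []).1 ++ ((list2cmdlineArgLoop cs res2 []).2).map (fun b => [b]))).flatten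
    = res2.flatten ++ pvEsc cs q ++ (if q then ['"'] else []) := by
  have hbuf := argLoop_buf cs res2 0
  have hfl := argLoop_flatten cs res2 0
  simp only [List.replicate_zero] at hbuf hfl
  have key := flushed_tail_esc cs 0 q
  simp only [Nat.mul_zero, List.replicate_zero, List.nil_append] at key
  have h3 : (if (list2cmdlineArgLoop cs res2 []).2 = [] then (list2cmdlineArgLoop cs res2 []).1
         else (list2cmdlineArgLoop cs res2 []).1 ++ ((list2cmdlineArgLoop cs res2 []).2).map (fun b => [b])).flatten
      = res2.flatten ++ (pvFlushed cs 0 ++ List.replicate (pvTail cs 0) '\\') := by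
    by_cases hb : (list2cmdlineArgLoop cs res2 []).2 = []
    · rw [if_pos hb, hfl]
      have h0 : List.replicate (pvTail cs 0) '\\' = ([] : List Char) := by rw [← hbuf, hb]
      simp [h0]
    · rw [if_neg hb]
      simp [hfl, flatten_map_singleton, hbuf]
  cases q
  · simp only [ite_self, List.replicate_zero, List.nil_append] at key
    rw [if_neg Bool.false_ne_true, h3, if_neg Bool.false_ne_true]
    rw [if_neg Bool.false_ne_true] at key
    simp [← key]
  · simp only [ite_self, List.replicate_zero, List.nil_append, if_pos rfl, if_true] at key
    rw [if_pos rfl, if_pos rfl, List.flatten_append, List.flatten_append, h3,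
      flatten_map_singleton, hbuf]
    simp [← key]

lemma loop_body_flatten (arg : String) (res : List (List Char)) :
    (list2cmdlineLoop [arg] res).flatten =
      res.flatten ++ (if res = [] then [] else [' ']) ++ list2cmdlineAltPiece arg := by
  simp only [list2cmdlineLoop]
  rw [argPhase]
  have hnq : (PySem.Str.isIn " " arg || PySem.Str.isIn "\t" arg ||
      (PySem.Str.isIn "&" arg && !(arg == "&")) || arg == "") = pvNq arg := rfl
  simp only [hnq, pieceAlt_eq]
  by_cases hq : pvNq arg = true <;> by_cases hres : res = [] <;>
    simp [hq, hres]

lemma loop_cons (arg : String) (rest : List String) (res : List (List Char)) :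
    list2cmdlineLoop (arg :: rest) res = list2cmdlineLoop rest (list2cmdlineLoop [arg] res) := by
  rw [list2cmdlineLoop, list2cmdlineLoop, list2cmdlineLoop]

lemma loop_step_ne_nil (arg : String) (res : List (List Char)) :
    list2cmdlineLoop [arg] res ≠ [] := by
  intro h
  have hb := loop_body_flatten arg res
  rw [h] at hb
  have hp : list2cmdlineAltPiece arg = [] := by
    by_cases hres : res = [] <;> simp [hres] at hb <;> simp [hb]
  exact pieceAlt_ne_nil arg hp

lemma loop_flatten_ne (rest : List String) : ∀ (res : List (List Char)), res ≠ [] →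
    (list2cmdlineLoop rest res).flatten =
      res.flatten ++ (rest.map (fun a => ' ' :: list2cmdlineAltPiece a)).flatten := by
  induction rest with
  | nil => intro res _; simp [list2cmdlineLoop]
  | cons a rest ih =>
    intro res hres
    rw [loop_cons, ih _ (loop_step_ne_nil a res), loop_body_flatten]
    simp [hres]

lemma join_space (b : List Char) (bs : List (List Char)) :
    PySem.Chars.join [' '] (b :: bs) = b ++ (bs.map (fun x => ' ' :: x)).flatten := by
  induction bs generalizing b with
  | nil => simp [PySem.Chars.join, List.intercalate]
  | cons c cs ih => rw [PySem.Chars.join_cons_cons, ih]; simp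

-- ===== VERDICT (by name: the statement is the Claim_ definition above) =====
theorem list2cmdline_spec : Claim_equal_list2cmdline := by
  intro seq _
  unfold Spec_list2cmdline list2cmdline list2cmdline_alt
  cases seq with
  | nil => simp [list2cmdlineLoop, PySem.Chars.join_nil]
  | cons a rest =>
    rw [loop_cons, loop_flatten_ne rest _ (loop_step_ne_nil a [])]
    have hb := loop_body_flatten a []
    simp only [List.flatten_nil, if_pos rfl, List.nil_append] at hb
    rw [hb, List.map_cons, join_space]
    simp [List.map_map, Function.comp_def]
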